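-- pv_equiv track=rewrite | github.com/cms-hh/inference_tools | dhi/util.py | get_neighbor_coordinates
-- ===== SOURCE A (Python) =====
-- import itertools
--
-- def get_neighbor_coordinates(shape, i, j):
--     """
--     Given a 2D shape and the coordinates *i* and *j* of a "pixel", returns a list of coordinates of
--     neighboring pixels in a 3x3 grid.
--     """
--     # check inputs
--     if len(shape) != 2:
--         raise ValueError("shape must have length 2, got {}".format(shape))
--     if any(l <= 0 for l in shape):
--         raise ValueError("shape must contain only positive numbers, got {}".format(shape))
--     if not (0 <= i < shape[0]):
--         raise ValueError("i must be within interval [0, shape[0])")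
--     if not (0 <= j < shape[1]):
--         raise ValueError("j must be within interval [0, shape[1])")
--
--     # determine coordinates of the window
--     i_start = max(0, i - 1)
--     i_end = min(shape[0] - 1, i + 1)
--     j_start = max(0, j - 1)
--     j_end = min(shape[1] - 1, j + 1)
--
--     # build neighbors
--     neighbors = list(itertools.product(range(i_start, i_end + 1), range(j_start, j_end + 1)))
--
--     # remove (i, j) again
--     neighbors.remove((i, j))
--
--     return neighbors
-- ===== SOURCE B (Python) =====
-- def get_neighbor_coordinates(shape, i, j):
--     """
--     Given a 2D shape and the coordinates *i* and *j* of a "pixel", returns a list of coordinates of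
--     neighboring pixels in a 3x3 grid.
--     """
--     # check inputs
--     if len(shape) != 2:
--         raise ValueError("shape must have length 2, got {}".format(shape))
--     if any(l <= 0 for l in shape):
--         raise ValueError("shape must contain only positive numbers, got {}".format(shape))
--     if not (0 <= i < shape[0]):
--         raise ValueError("i must be within interval [0, shape[0])")
--     if not (0 <= j < shape[1]):
--         raise ValueError("j must be within interval [0, shape[1])")
--
--     # stage 1: the valid columns of the window, computed once
--     cols = [c for c in (j - 1, j, j + 1) if 0 <= c < shape[1]]
--
--     # stage 2: assemble the three row blocks; only the middle row drops the center column
--     out = []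
--     if i > 0:
--         out += [(i - 1, c) for c in cols]
--     out += [(i, c) for c in cols if c != j]
--     if i + 1 < shape[0]:
--         out += [(i + 1, c) for c in cols]
--     return out
-- ===== Notes on version B (the rewrite author's own statement) =====
-- stated objective: alternative
-- what changed: Replaces the clamp-window itertools.product + list.remove(center) strategy with a staged row-block assembly: the valid column list is computed once, then the top row, the middle row with the center column filtered out, and the bottom row are concatenated, each guarded by its own row-bound test; no removal pass and no 2D product.
import Mathlib
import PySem

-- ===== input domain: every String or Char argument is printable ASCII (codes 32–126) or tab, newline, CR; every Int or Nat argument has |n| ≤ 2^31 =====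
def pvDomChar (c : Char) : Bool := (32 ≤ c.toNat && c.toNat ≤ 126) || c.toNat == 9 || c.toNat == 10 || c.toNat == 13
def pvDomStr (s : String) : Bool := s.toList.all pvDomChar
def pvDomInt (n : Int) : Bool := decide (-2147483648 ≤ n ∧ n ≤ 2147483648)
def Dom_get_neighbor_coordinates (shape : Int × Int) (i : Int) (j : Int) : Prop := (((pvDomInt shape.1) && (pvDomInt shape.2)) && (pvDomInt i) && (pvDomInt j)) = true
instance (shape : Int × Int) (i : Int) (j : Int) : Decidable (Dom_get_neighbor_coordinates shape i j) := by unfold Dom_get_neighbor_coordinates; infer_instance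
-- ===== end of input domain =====

-- B replaces A's clamp-window itertools.product + remove(center) with a staged row-block assembly:
-- the valid column list is computed once, then top / middle (center column dropped) / bottom row
-- blocks are concatenated under their own row-bound guards (objective: alternative decomposition).

-- ===== PORT A =====
-- A's four validation checks all raise ValueError; the raising inputs are exactly those excluded by
-- Pre_get_neighbor_coordinates below (len(shape) != 2 is impossible under the pair type).
-- list.remove raises ValueError when the element is absent; under Pre_ the center (i, j) is always
-- in the window, so the `none` case of PySem.List.remove? is unreachable and `.getD []` is never used.
def get_neighbor_coordinates (shape : Int × Int) (i : Int) (j : Int) : List (Int × Int) :=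
  let i_start := max 0 (i - 1)
  let i_end := min (shape.1 - 1) (i + 1)
  let j_start := max 0 (j - 1)
  let j_end := min (shape.2 - 1) (j + 1)
  let neighbors := (PySem.List.pyRange i_start (i_end + 1) 1).flatMap
    (fun a => (PySem.List.pyRange j_start (j_end + 1) 1).map (fun b => (a, b)))
  (PySem.List.remove? neighbors (i, j)).getD []

-- ===== PORT B =====
-- Source B's staged assembly: the `cols` comprehension, then the three `out +=` row blocks
def get_neighbor_coordinates_alt (shape : Int × Int) (i : Int) (j : Int) : List (Int × Int) :=
  let cols := [j - 1, j, j + 1].filter (fun c => decide (0 ≤ c ∧ c < shape.2))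
  let out : List (Int × Int) := []
  let out := if 0 < i then out ++ cols.map (fun c => (i - 1, c)) else out
  let out := out ++ (cols.filter (fun c => decide (c ≠ j))).map (fun c => (i, c))
  if i + 1 < shape.1 then out ++ cols.map (fun c => (i + 1, c)) else out

-- ===== PRECONDITION & SPEC =====
-- exactly the inputs on which the Python A returns normally: both shape entries positive and the
-- pixel (i, j) inside the grid (each of A's four ValueError checks passes; B raises there too)
def Pre_get_neighbor_coordinates (shape : Int × Int) (i : Int) (j : Int) : Prop :=
  0 < shape.1 ∧ 0 < shape.2 ∧ 0 ≤ i ∧ i < shape.1 ∧ 0 ≤ j ∧ j < shape.2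
instance (shape : Int × Int) (i : Int) (j : Int) : Decidable (Pre_get_neighbor_coordinates shape i j) := by unfold Pre_get_neighbor_coordinates; infer_instance
def pvWitness_get_neighbor_coordinates : (Int × Int) × Int × Int := ((3, 3), 1, 1)
def Spec_get_neighbor_coordinates (shape : Int × Int) (i : Int) (j : Int) (out : List (Int × Int)) : Prop := out = get_neighbor_coordinates_alt shape i j
instance (shape : Int × Int) (i : Int) (j : Int) (out : List (Int × Int)) : Decidable (Spec_get_neighbor_coordinates shape i j out) := by unfold Spec_get_neighbor_coordinates; infer_instance

-- ===== CLAIM (what is proved, stated in full; the proofs are below) =====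
def Claim_equal_get_neighbor_coordinates : Prop := ∀ (shape : Int × Int) (i : Int) (j : Int), Dom_get_neighbor_coordinates shape i j → Pre_get_neighbor_coordinates shape i j → Spec_get_neighbor_coordinates shape i j (get_neighbor_coordinates shape i j)

-- ===== LEMMAS AND PROOFS =====

-- A's clamped range is the three candidate coordinates filtered to the grid bound
lemma pvWindow_eq (h x : Int) (h1 : 0 ≤ x) (h2 : x < h) :
    PySem.List.pyRange (max 0 (x - 1)) (min (h - 1) (x + 1) + 1) 1
      = [x + -1, x, x + 1].filter (fun a => decide (0 ≤ a ∧ a < h)) := by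
  by_cases hx0 : x = 0 <;> by_cases hxT : x = h - 1
  · subst hx0
    have e1 : max 0 ((0:Int) - 1) = 0 := by omega
    have e2 : min (h-1) ((0:Int)+1) + 1 = 1 := by omega
    rw [e1, e2, PySem.List.pyRange_one_cons (by omega), PySem.List.pyRange_one_eq_nil (by omega)]
    have c2 : (0 ≤ (0:Int) ∧ (0:Int) < h) := by omega
    have d3 := eq_false (show ¬ (1:Int) < h by omega)
    simp [List.filter, c2, d3]
  · subst hx0
    have e1 : max 0 ((0:Int) - 1) = 0 := by omega
    have e2 : min (h-1) ((0:Int)+1) + 1 = 2 := by omega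
    rw [e1, e2, PySem.List.pyRange_one_cons (by omega), PySem.List.pyRange_one_cons (by omega),
        PySem.List.pyRange_one_eq_nil (by omega)]
    have c2 : (0 ≤ (0:Int) ∧ (0:Int) < h) := by omega
    have d3 := eq_true (show (1:Int) < h by omega)
    simp [List.filter, c2, d3]
  · have e1 : max 0 (x - 1) = x - 1 := by omega
    have e2 : min (h-1) (x+1) + 1 = x + 1 := by omega
    rw [e1, e2, PySem.List.pyRange_one_cons (by omega), PySem.List.pyRange_one_cons (by omega),
        PySem.List.pyRange_one_eq_nil (by omega)]
    have c1 : (0 ≤ x + -1 ∧ x + -1 < h) := by omega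
    have c2 : (0 ≤ x ∧ x < h) := by omega
    have c3 : ¬ (0 ≤ x + 1 ∧ x + 1 < h) := by omega
    simp [List.filter, c1, c2, c3]
    omega
  · have e1 : max 0 (x - 1) = x - 1 := by omega
    have e2 : min (h-1) (x+1) + 1 = x + 2 := by omega
    rw [e1, e2, PySem.List.pyRange_one_cons (by omega), PySem.List.pyRange_one_cons (by omega),
        PySem.List.pyRange_one_cons (by omega), PySem.List.pyRange_one_eq_nil (by omega)]
    have c1 : (0 ≤ x + -1 ∧ x + -1 < h) := by omega
    have c2 : (0 ≤ x ∧ x < h) := by omega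
    have c3 : (0 ≤ x + 1 ∧ x + 1 < h) := by omega
    simp [List.filter, c1, c2, c3]
    omega

-- erasing the center from the filtered product is B's three row blocks
-- (16 cases over the four boundary predicates)
lemma pvCore (h w i j : Int) (hi1 : 0 ≤ i) (hi2 : i < h) (hj1 : 0 ≤ j) (hj2 : j < w) :
    (([i + -1, i, i + 1].filter (fun a => decide (0 ≤ a ∧ a < h))).flatMap
        (fun a => ([j + -1, j, j + 1].filter (fun b => decide (0 ≤ b ∧ b < w))).map (fun b => (a, b)))).erase (i, j)
      = get_neighbor_coordinates_alt (h, w) i j := by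
  have pA : (0 ≤ i + -1 ∧ i + -1 < h) ↔ 0 < i := by omega
  have pB : (0 ≤ i + 1 ∧ i + 1 < h) ↔ i + 1 < h := by omega
  have pC : (0 ≤ j + -1 ∧ j + -1 < w) ↔ 0 < j := by omega
  have pD : (0 ≤ j + 1 ∧ j + 1 < w) ↔ j + 1 < w := by omega
  have pI : (0 ≤ i ∧ i < h) := ⟨hi1, hi2⟩
  have pJ : (0 ≤ j ∧ j < w) := ⟨hj1, hj2⟩
  have n2 : j + -1 ≠ j := by omega
  have n3 : j + 1 ≠ j := by omega
  have e1 : j - 1 = j + -1 := by ring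
  have e2 : i - 1 = i + -1 := by ring
  have m1 : i + -1 ≠ i := by omega
  have m2 : i + 1 ≠ i := by omega
  simp only [get_neighbor_coordinates_alt, e1, e2]
  by_cases hA : 0 < i <;> by_cases hB : i + 1 < h <;>
    by_cases hC : 0 < j <;> by_cases hD : j + 1 < w <;>
  · simp only [List.filter_cons, List.filter_nil, decide_eq_true_eq, pA, pB, pC, pD,
      eq_true pI, eq_true pJ, if_true]
    simp only [hA, hB, hC, hD, if_true, if_false]
    simp [Prod.ext_iff, n2, n3, m1]

-- ===== VERDICT (by name: the statement is the Claim_ definition above) =====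
theorem get_neighbor_coordinates_spec : Claim_equal_get_neighbor_coordinates := by
  intro shape i j _ hpre
  obtain ⟨h, w⟩ := shape
  obtain ⟨hh, hw, hi1, hi2, hj1, hj2⟩ := hpre
  unfold Spec_get_neighbor_coordinates
  simp only [get_neighbor_coordinates]
  rw [pvWindow_eq h i hi1 hi2, pvWindow_eq w j hj1 hj2]
  rw [PySem.List.remove?_eq_some_erase _ (i, j) (by
    simp [List.mem_flatMap]
    exact ⟨by omega, by omega⟩)]
  simp only [Option.getD_some]
  exact pvCore h w i j hi1 hi2 hj1 hj2
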